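-- pv_equiv track=rewrite | github.com/netizen-0/adsdobot | forward_content_news.py | _escape_md
-- ===== SOURCE A (Python) =====
-- def _escape_md(text):
--     """Escape Markdown V1 special characters to prevent parse errors."""
--     if not text:
--         return text
--     # Characters that need escaping in Markdown V1: _ * [ ] ( ) ~ ` > # + - = | { } . !
--     # But we only escape the ones that commonly break: unmatched _ * ` [
--     # Strategy: if the count of a delimiter is odd, escape all occurrences
--     result = text
--     for ch in ['*', '_', '`']:
--         if result.count(ch) % 2 != 0:
--             result = result.replace(ch, '\\' + ch)
--     return result
-- ===== SOURCE B (Python) =====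
-- def _escape_md(text):
--     """Escape Markdown V1 special characters to prevent parse errors."""
--     if not text:
--         return text
--     odd = {ch for ch in '*_`' if text.count(ch) % 2}
--     return ''.join('\\' + c if c in odd else c for c in text)
-- ===== Notes on version B (the rewrite author's own statement) =====
-- stated objective: alternative
-- what changed: A does three sequential count-then-replace scans mutating the string; B computes the odd-count delimiter set once from the original text and builds the result in a single character-by-character join pass.
import Mathlib
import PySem

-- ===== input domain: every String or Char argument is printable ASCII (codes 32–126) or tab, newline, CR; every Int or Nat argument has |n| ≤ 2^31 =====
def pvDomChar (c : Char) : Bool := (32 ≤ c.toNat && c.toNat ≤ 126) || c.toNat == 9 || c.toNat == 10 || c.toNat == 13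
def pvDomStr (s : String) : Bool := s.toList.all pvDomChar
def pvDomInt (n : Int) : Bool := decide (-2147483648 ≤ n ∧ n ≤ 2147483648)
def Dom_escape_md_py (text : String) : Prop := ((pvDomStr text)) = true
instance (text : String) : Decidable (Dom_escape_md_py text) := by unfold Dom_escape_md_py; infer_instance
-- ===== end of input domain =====

-- B replaces A's three count-and-replace scans by one odd-count set computed up
-- front and a single character-by-character pass (objective: alternative decomposition).

-- ===== PORT A =====
-- for ch in ['*','_','`']: if result.count(ch) % 2 != 0: result = result.replace(ch, '\' + ch)
def escape_md_py (text : String) : String :=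
  if PySem.Str.len text = 0 then text
  else
    (['*', '_', '`'] : List Char).foldl
      (fun result ch =>
        if PySem.Str.count result (String.ofList [ch]) % 2 ≠ 0 then
          PySem.Str.replace result (String.ofList [ch]) (String.ofList ['\\', ch])
        else result)
      text

-- ===== PORT B =====
-- odd = {ch for ch in '*_`' if text.count(ch) % 2}; ''.join('\'+c if c in odd else c for c in text)
def escape_md_py_alt (text : String) : String :=
  if PySem.Str.len text = 0 then text
  else
    let odd : PySem.Set Char :=
      PySem.Set.ofList ((['*', '_', '`'] : List Char).filter
        (fun ch => PySem.Str.count text (String.ofList [ch]) % 2 = 1))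
    String.ofList (text.toList.flatMap (fun c => if odd.contains c then ['\\', c] else [c]))

-- ===== PRECONDITION & SPEC =====
def Spec_escape_md_py (text : String) (out : String) : Prop := out = escape_md_py_alt text
instance (text : String) (out : String) : Decidable (Spec_escape_md_py text out) := by unfold Spec_escape_md_py; infer_instance

-- ===== CLAIM (what is proved, stated in full; the proofs are below) =====
def Claim_equal_escape_md_py : Prop := ∀ (text : String), Dom_escape_md_py text → Spec_escape_md_py text (escape_md_py text)

-- ===== LEMMAS AND PROOFS =====

-- per-char escaping function: what str.replace(ch, '\'+ch) does character by character
def pvEsc (a : Char) (x : Char) : List Char := if x = a then ['\\', a] else [x]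

lemma pvCountGo_single (a : Char) : ∀ (l : List Char) (fuel k : Nat), l.length ≤ fuel →
    PySem.Chars.count.go [a] fuel l k = k + l.count a := by
  intro l
  induction l with
  | nil => intro fuel k _; cases fuel <;> simp [PySem.Chars.count.go]
  | cons c t ih =>
    intro fuel k h
    cases fuel with
    | zero => simp at h
    | succ n =>
      simp only [PySem.Chars.count.go]
      by_cases hc : c = a
      · subst hc
        rw [if_pos (by simp [List.isPrefixOf])]
        simp only [List.length_cons] at h
        simp only [List.length_cons, List.length_nil, List.drop_succ_cons, List.drop_zero]
        rw [ih n (k + 1) (by omega)]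
        simp
        omega
      · rw [if_neg (by simp [List.isPrefixOf]; exact fun h' => hc h'.symm)]
        simp only [List.length_cons] at h
        rw [ih n k (by omega)]
        simp [hc]

lemma pvCount_single (a : Char) (l : List Char) : PySem.Chars.count l [a] = l.count a := by
  simp [PySem.Chars.count]
  rw [pvCountGo_single a l l.length 0 (le_refl _)]
  omega

lemma pvReplaceGo_single (a : Char) (nn : List Char) : ∀ (l acc : List Char) (fuel : Nat),
    l.length ≤ fuel →
    PySem.Chars.replace.go [a] nn fuel l acc
      = acc.reverse ++ l.flatMap (fun x => if x = a then nn else [x]) := by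
  intro l
  induction l with
  | nil => intro acc fuel _; cases fuel <;> simp [PySem.Chars.replace.go]
  | cons c t ih =>
    intro acc fuel h
    cases fuel with
    | zero => simp at h
    | succ n =>
      simp only [PySem.Chars.replace.go]
      simp only [List.length_cons] at h
      by_cases hc : c = a
      · subst hc
        rw [if_pos (by simp [List.isPrefixOf])]
        simp only [List.length_cons, List.length_nil, List.drop_succ_cons, List.drop_zero]
        rw [ih (nn.reverse ++ acc) n (by omega)]
        simp
      · rw [if_neg (by simp [List.isPrefixOf]; exact fun h' => hc h'.symm)]
        rw [ih (c :: acc) n (by omega)]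
        simp [hc]

lemma pvReplace_single (a : Char) (nn : List Char) (l : List Char) :
    PySem.Chars.replace l [a] nn = l.flatMap (fun x => if x = a then nn else [x]) := by
  simp [PySem.Chars.replace]
  rw [pvReplaceGo_single a nn l [] l.length (le_refl _)]
  simp

lemma pvCount_esc (a b : Char) (hb : b ≠ '\\') (l : List Char) :
    (l.flatMap (pvEsc a)).count b = l.count b := by
  induction l with
  | nil => simp
  | cons c t ih =>
    simp only [List.flatMap_cons, List.count_append, ih, List.count_cons]
    unfold pvEsc
    by_cases hc : c = a
    · subst hc
      simp [List.count_cons, List.count_nil, Ne.symm hb, beq_iff_eq]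
      split_ifs <;> omega
    · simp [hc, List.count_cons, beq_iff_eq]
      split_ifs <;> omega

-- one conditional replace pass, as a function of the oddness test
def pvStep (b : Bool) (a : Char) (l : List Char) : List Char :=
  if b then l.flatMap (pvEsc a) else l

lemma pvStep_eq_flatMap (b : Bool) (a : Char) (l : List Char) :
    pvStep b a l = l.flatMap (fun x => if b ∧ x = a then ['\\', a] else [x]) := by
  cases b
  · simp [pvStep]
  · simp only [pvStep, if_pos]
    apply List.flatMap_congr
    intro x _
    simp [pvEsc]

lemma pvKey (l : List Char) (p q r : Bool) :
    pvStep r '`' (pvStep q '_' (pvStep p '*' l))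
      = l.flatMap (fun c =>
          if (p && c == '*') || (q && c == '_') || (r && c == '`') then ['\\', c] else [c]) := by
  rw [pvStep_eq_flatMap, pvStep_eq_flatMap, pvStep_eq_flatMap, List.flatMap_assoc,
    List.flatMap_assoc]
  apply List.flatMap_congr
  intro c _
  cases p <;> cases q <;> cases r <;>
    by_cases h1 : c = '*' <;> by_cases h2 : c = '_' <;> by_cases h3 : c = '`' <;>
      simp_all

lemma pvParity (n : Nat) : (decide (n % 2 ≠ 0)) = decide (n % 2 = 1) := by
  by_cases h : n % 2 = 1 <;> simp_all

lemma pvReplace_esc (a : Char) (l : List Char) :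
    PySem.Chars.replace l [a] ['\\', a] = l.flatMap (pvEsc a) := by
  rw [pvReplace_single]; rfl

lemma pvCE1 (l : List Char) : (l.flatMap (pvEsc '*')).count '_' = l.count '_' :=
  pvCount_esc _ _ (by decide) _
lemma pvCE2 (l : List Char) : (l.flatMap (pvEsc '*')).count '`' = l.count '`' :=
  pvCount_esc _ _ (by decide) _
lemma pvCE3 (l : List Char) : (l.flatMap (pvEsc '_')).count '`' = l.count '`' :=
  pvCount_esc _ _ (by decide) _

lemma pvA_chars (text : String) (h : ¬ PySem.Str.len text = 0) :
    (escape_md_py text).toList =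
      pvStep (decide (text.toList.count '`' % 2 ≠ 0)) '`'
        (pvStep (decide (text.toList.count '_' % 2 ≠ 0)) '_'
          (pvStep (decide (text.toList.count '*' % 2 ≠ 0)) '*' text.toList)) := by
  unfold escape_md_py
  rw [if_neg h]
  simp only [List.foldl_cons, List.foldl_nil]
  split_ifs with a1 a2 a3 a2 a3 a3 a3 <;>
    simp only [PySem.Str.count_eq, String.toList_ofList, pvCount_single,
      PySem.Str.toList_replace, pvReplace_esc, pvCE1, pvCE2, pvCE3] at * <;>
    simp_all [pvStep]

lemma pvB_mem (f : Char → Bool) (c : Char) :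
    ((PySem.Set.ofList (['*', '_', '`'].filter f)).contains c)
      = ((f '*' && c == '*') || (f '_' && c == '_') || (f '`' && c == '`')) := by
  rw [Bool.eq_iff_iff, PySem.Set.contains_iff, PySem.Set.mem_ofList, List.mem_filter]
  by_cases h1 : c = '*' <;> by_cases h2 : c = '_' <;> by_cases h3 : c = '`' <;> simp_all

lemma pvB_chars (text : String) (h : ¬ PySem.Str.len text = 0) :
    (escape_md_py_alt text).toList =
      text.toList.flatMap (fun c =>
        if (decide (text.toList.count '*' % 2 = 1) && c == '*')
            || (decide (text.toList.count '_' % 2 = 1) && c == '_')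
            || (decide (text.toList.count '`' % 2 = 1) && c == '`') then ['\\', c]
        else [c]) := by
  unfold escape_md_py_alt
  rw [if_neg h]
  simp only [String.toList_ofList]
  apply List.flatMap_congr
  intro c _
  rw [pvB_mem]
  simp only [PySem.Str.count_eq, String.toList_ofList, pvCount_single]

-- ===== VERDICT (by name: the statement is the Claim_ definition above) =====
theorem escape_md_py_spec : Claim_equal_escape_md_py := by
  intro text _
  unfold Spec_escape_md_py
  by_cases h : PySem.Str.len text = 0
  · unfold escape_md_py escape_md_py_alt
    rw [if_pos h, if_pos h]
  · rw [← String.toList_inj, pvA_chars text h, pvB_chars text h, pvKey]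
    simp only [pvParity]
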